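-- pv_equiv track=rewrite | github.com/woodgang2/GambitChallenge | gambit.py | find_shifts_for_offsets
-- ===== SOURCE A (Python) =====
-- def is_valid_decryption(decrypted_text, valid_chars):
--     return all(char in valid_chars for char in decrypted_text)
--
-- def find_shifts_for_offsets(cipher_numbers, valid_chars):
--     shift_map = {}
--     for offset in range(3):
--         for shift in range(256):
--             decrypted = [(chr((num - shift) % 256)) for num in cipher_numbers[offset::3]]
--             if is_valid_decryption(decrypted, valid_chars):
--                 shift_map[offset] = shift
--                 break
--     return shift_map
-- ===== SOURCE B (Python) =====
-- def find_shifts_for_offsets(cipher_numbers, valid_chars):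
--     # Instead of trying every shift and re-decrypting, build for each byte the set of
--     # shifts that decrypt it into a valid character, intersect these allowed-shift
--     # sets across the offset group, and take the smallest surviving shift.
--     valid_codes = {ord(c) for c in valid_chars}
--     shift_map = {}
--     for offset in range(3):
--         residues = {num % 256 for num in cipher_numbers[offset::3]}
--         shifts = set(range(256))
--         for r in residues:
--             shifts &= {(r - v) % 256 for v in valid_codes}
--         if shifts:
--             shift_map[offset] = min(shifts)
--     return shift_map
-- ===== Notes on version B (the rewrite author's own statement) =====
-- stated objective: faster
-- what changed: B inverts the search: instead of trying each of the 256 shifts and re-decrypting the whole group, it computes for each distinct byte residue the set of shifts that decrypt it into a valid character, intersects these allowed-shift sets across the group, and returns the minimum surviving shift.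
import Mathlib
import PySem

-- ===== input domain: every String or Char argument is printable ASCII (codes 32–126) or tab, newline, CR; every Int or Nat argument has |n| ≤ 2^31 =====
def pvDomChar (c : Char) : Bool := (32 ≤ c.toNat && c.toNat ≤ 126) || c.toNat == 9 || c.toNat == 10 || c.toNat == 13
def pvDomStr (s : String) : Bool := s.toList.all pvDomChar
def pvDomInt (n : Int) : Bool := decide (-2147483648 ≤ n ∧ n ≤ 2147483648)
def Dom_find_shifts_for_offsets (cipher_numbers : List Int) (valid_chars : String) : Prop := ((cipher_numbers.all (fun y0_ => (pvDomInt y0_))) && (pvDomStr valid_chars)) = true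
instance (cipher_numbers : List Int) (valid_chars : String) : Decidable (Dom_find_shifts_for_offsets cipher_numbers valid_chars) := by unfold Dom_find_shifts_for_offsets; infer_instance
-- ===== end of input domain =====

-- B inverts the search: it intersects, over the distinct byte residues of each offset
-- group, the sets of shifts that decrypt that byte into a valid character, and returns
-- the minimum surviving shift — no per-shift re-decryption loop (objective: faster).

-- ===== PORT A =====
-- 'char in valid_chars' on the 1-char string chr(…) is the substring test of a singleton (exact)
def is_valid_decryption (decrypted_text : List Char) (valid_chars : String) : Bool :=
  decrypted_text.all (fun ch => PySem.Chars.isIn [ch] valid_chars.toList)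

-- inner 'for shift in …: … break' loop of A: first shift whose decryption is valid
def findShiftA (group : List Int) (valid_chars : String) (shifts : List Int) : Option Int :=
  match shifts with
  | [] => none
  | shift :: rest =>
    let decrypted := group.map (fun num => Char.ofNat ((PySem.Int.mod (num - shift) 256).toNat))
    if is_valid_decryption decrypted valid_chars then some shift else findShiftA group valid_chars rest

def find_shifts_for_offsets (cipher_numbers : List Int) (valid_chars : String) : List (Int × Int) :=
  ((PySem.List.pyRange 0 3 1).foldl (fun (shift_map : PySem.Dict Int Int) offset =>
      -- cipher_numbers[offset::3]; slice? is some since step 3 ≠ 0, so .getD [] is exact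
      match findShiftA ((PySem.List.slice? cipher_numbers (some offset) none 3).getD [])
              valid_chars (PySem.List.pyRange 0 256 1) with
      | some shift => shift_map.insert offset shift
      | none => shift_map) PySem.Dict.empty).items

-- ===== PORT B =====
-- Source B's '{(r - v) % 256 for v in valid_codes}': the shifts that decrypt byte r validly
def shiftCandidates (r : Int) (valid_codes : PySem.Set Int) : PySem.Set Int :=
  PySem.Set.ofList (valid_codes.map (fun v => PySem.Int.mod (r - v) 256))

-- Source B's shift_map has the fresh distinct keys 0,1,2 inserted in order, so its items list
-- is exactly this filterMap over the offsets; 'shifts &= …' over the residues is the foldl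
-- of Set.inter, and 'if shifts: … min(shifts)' is the match on min? (none iff empty).
def find_shifts_for_offsets_alt (cipher_numbers : List Int) (valid_chars : String) : List (Int × Int) :=
  let valid_codes : PySem.Set Int := PySem.Set.ofList (valid_chars.toList.map (fun c => (c.toNat : Int)))
  (PySem.List.pyRange 0 3 1).filterMap (fun offset =>
    let residues : PySem.Set Int := PySem.Set.ofList
      (((PySem.List.slice? cipher_numbers (some offset) none 3).getD []).map (fun num => PySem.Int.mod num 256))
    let shifts : PySem.Set Int := residues.foldl
      (fun s r => PySem.Set.inter s (shiftCandidates r valid_codes))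
      (PySem.Set.ofList (PySem.List.pyRange 0 256 1))
    match PySem.List.min? shifts (fun x => x) with
    | some m => some (offset, m)
    | none => none)

-- ===== PRECONDITION & SPEC =====
def Spec_find_shifts_for_offsets (cipher_numbers : List Int) (valid_chars : String) (out : List (Int × Int)) : Prop := out = find_shifts_for_offsets_alt cipher_numbers valid_chars
instance (cipher_numbers : List Int) (valid_chars : String) (out : List (Int × Int)) : Decidable (Spec_find_shifts_for_offsets cipher_numbers valid_chars out) := by unfold Spec_find_shifts_for_offsets; infer_instance

-- ===== CLAIM (what is proved, stated in full; the proofs are below) =====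
def Claim_equal_find_shifts_for_offsets : Prop := ∀ (cipher_numbers : List Int) (valid_chars : String), Dom_find_shifts_for_offsets cipher_numbers valid_chars → Spec_find_shifts_for_offsets cipher_numbers valid_chars (find_shifts_for_offsets cipher_numbers valid_chars)

-- ===== LEMMAS AND PROOFS =====

-- taking the residue first does not change the shifted byte
theorem pv_mod_sub_mod (num shift : Int) :
    PySem.Int.mod (PySem.Int.mod num 256 - shift) 256 = PySem.Int.mod (num - shift) 256 := by
  rw [PySem.Int.mod_eq_emod_of_pos (by norm_num), PySem.Int.mod_eq_emod_of_pos (by norm_num),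
    PySem.Int.mod_eq_emod_of_pos (by norm_num)]
  omega

-- membership of chr(v) in valid_chars ↔ membership of v in the code set, for a byte v
theorem pv_isIn_singleton_eq (v : Int) (h0 : 0 ≤ v) (h1 : v < 256) (cs : List Char) :
    PySem.Chars.isIn [Char.ofNat v.toNat] cs
      = PySem.Set.contains (PySem.Set.ofList (cs.map (fun c => (c.toNat : Int)))) v := by
  rcases Bool.eq_false_or_eq_true (PySem.Set.contains (PySem.Set.ofList (cs.map (fun c => (c.toNat : Int)))) v) with hc | hc
  · rw [hc]
    rw [PySem.Chars.isIn_iff_infix, List.singleton_infix_iff]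
    rw [PySem.Set.contains] at hc
    simp [PySem.Set.mem_ofList] at hc
    rcases hc with ⟨c, hcmem, hcv⟩
    have : c.toNat = v.toNat := by omega
    rw [← this, Char.ofNat_toNat]
    exact hcmem
  · rw [hc]
    rw [← Bool.not_eq_true, PySem.Chars.isIn_iff_infix, List.singleton_infix_iff]
    intro hmem
    have : v ∈ cs.map (fun c => (c.toNat : Int)) := by
      refine List.mem_map.mpr ⟨Char.ofNat v.toNat, hmem, ?_⟩
      have : (Char.ofNat v.toNat).toNat = v.toNat := by
        rw [Char.toNat_ofNat, if_pos]; exact Or.inl (by omega)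
      rw [this]; omega
    rcases List.mem_map.mp this with ⟨c, hcmem, hcv⟩
    rw [PySem.Set.contains] at hc
    simp [PySem.Set.mem_ofList] at hc
    exact hc c hcmem hcv

-- per-shift: A's validity test on the group = the residue-wise code test
theorem pv_valid_eq (g : List Int) (valid_chars : String) (shift : Int) :
    is_valid_decryption (g.map (fun num => Char.ofNat ((PySem.Int.mod (num - shift) 256).toNat))) valid_chars
      = (PySem.Set.ofList (g.map (fun num => PySem.Int.mod num 256))).all
          (fun r => PySem.Set.contains (PySem.Set.ofList (valid_chars.toList.map (fun c => (c.toNat : Int))))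
            (PySem.Int.mod (r - shift) 256)) := by
  rw [is_valid_decryption, List.all_map]
  rcases Bool.eq_false_or_eq_true ((PySem.Set.ofList (g.map (fun num => PySem.Int.mod num 256))).all
      (fun r => PySem.Set.contains (PySem.Set.ofList (valid_chars.toList.map (fun c => (c.toNat : Int))))
        (PySem.Int.mod (r - shift) 256))) with hc | hc <;> rw [hc]
  · rw [List.all_eq_true]
    rw [List.all_eq_true] at hc
    intro num hnum
    have hr : PySem.Int.mod num 256 ∈ PySem.Set.ofList (g.map (fun num => PySem.Int.mod num 256)) :=
      (PySem.Set.mem_ofList _ _).mpr (List.mem_map.mpr ⟨num, hnum, rfl⟩)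
    have := hc _ hr
    rw [pv_mod_sub_mod] at this
    simp only [Function.comp]
    rw [pv_isIn_singleton_eq _ (PySem.Int.mod_nonneg _ (show (0:Int) < 256 by norm_num)) (PySem.Int.mod_lt _ (show (0:Int) < 256 by norm_num))]
    exact this
  · rw [← Bool.not_eq_true, List.all_eq_true]
    rw [← Bool.not_eq_true, List.all_eq_true] at hc
    intro hall
    apply hc
    intro r hr
    have hr' : r ∈ g.map (fun num => PySem.Int.mod num 256) := (PySem.Set.mem_ofList _ _).mp hr
    rcases List.mem_map.mp hr' with ⟨num, hnum, rfl⟩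
    have := hall num hnum
    simp only [Function.comp] at this
    rw [pv_mod_sub_mod]
    rw [pv_isIn_singleton_eq _ (PySem.Int.mod_nonneg _ (show (0:Int) < 256 by norm_num)) (PySem.Int.mod_lt _ (show (0:Int) < 256 by norm_num))] at this
    exact this

-- findShiftA is find? over the shift list
theorem pv_findShiftA_eq_find (g : List Int) (vc : String) (shifts : List Int) :
    findShiftA g vc shifts
      = shifts.find? (fun s => is_valid_decryption (g.map (fun num => Char.ofNat ((PySem.Int.mod (num - s) 256).toNat))) vc) := by
  induction shifts with
  | nil => rfl
  | cons s rest ih =>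
    rw [findShiftA, List.find?]
    split <;> simp_all

-- find? only depends on the predicate's values on the list
theorem pv_find?_congr (l : List Int) (p q : Int → Bool) (h : ∀ x ∈ l, p x = q x) :
    l.find? p = l.find? q := by
  induction l with
  | nil => rfl
  | cons x t ih =>
    rw [List.find?, List.find?, h x (List.mem_cons_self ..)]
    split
    · rfl
    · exact ih (fun y hy => h y (List.mem_cons_of_mem _ hy))

-- folding Set.inter is filtering the initial list by membership in every intersected set
theorem pv_foldl_inter (rs : List Int) (init : List Int) (F : Int → PySem.Set Int) :
    rs.foldl (fun (s : PySem.Set Int) r => PySem.Set.inter s (F r)) init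
      = init.filter (fun x => rs.all (fun r => PySem.Set.contains (F r) x)) := by
  induction rs generalizing init with
  | nil => simp
  | cons r rest ih =>
    rw [List.foldl_cons, ih, PySem.Set.inter, List.filter_filter]
    apply List.filter_congr
    intro x _
    simp [Bool.and_comm]

-- for a byte shift s, membership in shiftCandidates r = the residue-wise code test,
-- provided every valid code is itself a byte (true on Dom)
theorem pv_mem_candidates (r s : Int) (hs0 : 0 ≤ s) (hs1 : s < 256)
    (codes : PySem.Set Int) (hcodes : ∀ v ∈ codes, 0 ≤ v ∧ v < 256) :
    PySem.Set.contains (shiftCandidates r codes) s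
      = PySem.Set.contains codes (PySem.Int.mod (r - s) 256) := by
  rw [Bool.eq_iff_iff, PySem.Set.contains_iff, PySem.Set.contains_iff]
  constructor
  · intro hmem
    rw [shiftCandidates, PySem.Set.mem_ofList] at hmem
    rcases List.mem_map.mp hmem with ⟨v, hv, hvs⟩
    rcases hcodes v hv with ⟨hv0, hv1⟩
    have : PySem.Int.mod (r - s) 256 = v := by
      rw [PySem.Int.mod_eq_emod_of_pos (by norm_num)]
      rw [PySem.Int.mod_eq_emod_of_pos (by norm_num)] at hvs
      omega
    exact this ▸ hv
  · intro hmem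
    rw [shiftCandidates, PySem.Set.mem_ofList]
    refine List.mem_map.mpr ⟨PySem.Int.mod (r - s) 256, hmem, ?_⟩
    have h0 := PySem.Int.mod_nonneg (r - s) (show (0:Int) < 256 by norm_num)
    have h1 := PySem.Int.mod_lt (r - s) (show (0:Int) < 256 by norm_num)
    rw [PySem.Int.mod_eq_emod_of_pos (by norm_num)] at h0 h1 ⊢
    rw [PySem.Int.mod_eq_emod_of_pos (by norm_num)]
    omega

-- min? of a strictly ascending list is its head
theorem pv_min?_pairwise (l : List Int) (h : l.Pairwise (· < ·)) :
    PySem.List.min? l (fun x => x) = l.head? := by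
  cases l with
  | nil => rfl
  | cons x t =>
    rw [PySem.List.min?_id_cons, List.head?_cons]
    have hfold : ∀ t : List Int, (∀ y ∈ t, x ≤ y) → t.foldl min x = x := by
      intro t
      induction t with
      | nil => intro _; rfl
      | cons a b ih =>
        intro hall
        rw [List.foldl_cons, min_eq_left (hall a (List.mem_cons_self ..))]
        exact ih (fun y hy => hall y (List.mem_cons_of_mem _ hy))
    rw [hfold t (fun y hy => le_of_lt ((List.pairwise_cons.mp h).1 y hy))]

-- head? of a filter is find?
theorem pv_head_filter (l : List Int) (p : Int → Bool) :
    (l.filter p).head? = l.find? p := by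
  induction l with
  | nil => rfl
  | cons x t ih =>
    rw [List.filter_cons, List.find?]
    split <;> simp_all

-- the outer loop over the three fresh distinct offsets: dict items = the filterMap list
theorem pv_fold_items (F : Int → Option Int) :
    (([0,1,2] : List Int).foldl (fun (m : PySem.Dict Int Int) o =>
        match F o with | some s => m.insert o s | none => m) PySem.Dict.empty).items
    = ([0,1,2] : List Int).filterMap (fun o => (F o).map (fun s => (o, s))) := by
  cases hF0 : F 0 <;> cases hF1 : F 1 <;> cases hF2 : F 2 <;>
    simp [hF0, hF1, hF2, PySem.Dict.insert, PySem.Dict.empty, PySem.Dict.contains]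

-- per offset group: A's first-found shift = B's minimum of the intersected shift sets
theorem pv_group_eq (g : List Int) (valid_chars : String)
    (hDom : ∀ c ∈ valid_chars.toList, pvDomChar c = true) :
    findShiftA g valid_chars (PySem.List.pyRange 0 256 1)
      = (PySem.List.min?
          ((PySem.Set.ofList (g.map (fun num => PySem.Int.mod num 256))).foldl
            (fun (s : PySem.Set Int) r => PySem.Set.inter s
              (shiftCandidates r (PySem.Set.ofList (valid_chars.toList.map (fun c => (c.toNat : Int))))))
            (PySem.Set.ofList (PySem.List.pyRange 0 256 1)))
          (fun x => x)) := by
  have hcodes : ∀ v ∈ PySem.Set.ofList (valid_chars.toList.map (fun c => (c.toNat : Int))),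
      0 ≤ v ∧ v < 256 := by
    intro v hv
    rw [PySem.Set.mem_ofList] at hv
    rcases List.mem_map.mp hv with ⟨c, hc, rfl⟩
    have := hDom c hc
    rw [pvDomChar] at this
    simp only [Bool.or_eq_true, Bool.and_eq_true, decide_eq_true_eq, beq_iff_eq] at this
    omega
  rw [pv_foldl_inter, PySem.Set.ofList_eq_self_of_nodup _ (PySem.List.nodup_pyRange_one 0 256),
    pv_min?_pairwise _ ((PySem.List.pairwise_lt_pyRange_one 0 256).filter _),
    pv_head_filter, pv_findShiftA_eq_find]
  apply pv_find?_congr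
  intro s hs
  rcases PySem.List.mem_pyRange_one.mp hs with ⟨h0, h1⟩
  rw [pv_valid_eq]
  exact congrArg (List.all _)
    (funext (fun r => (pv_mem_candidates r s h0 h1 _ hcodes))).symm

-- ===== VERDICT (by name: the statement is the Claim_ definition above) =====
theorem find_shifts_for_offsets_spec : Claim_equal_find_shifts_for_offsets := by
  unfold Claim_equal_find_shifts_for_offsets
  intro cipher_numbers valid_chars hDom
  unfold Spec_find_shifts_for_offsets
  unfold find_shifts_for_offsets find_shifts_for_offsets_alt
  have hDom' : ∀ c ∈ valid_chars.toList, pvDomChar c = true := by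
    unfold Dom_find_shifts_for_offsets at hDom
    simp only [Bool.and_eq_true] at hDom
    exact List.all_eq_true.mp hDom.2
  have h3 : PySem.List.pyRange 0 3 1 = [0, 1, 2] := by decide
  rw [h3]
  refine (pv_fold_items _).trans ?_
  have hfun : ∀ o : Int,
      (findShiftA ((PySem.List.slice? cipher_numbers (some o) none 3).getD [])
          valid_chars (PySem.List.pyRange 0 256 1)).map (fun s => (o, s))
        = (match PySem.List.min?
            ((PySem.Set.ofList (((PySem.List.slice? cipher_numbers (some o) none 3).getD []).map
                (fun num => PySem.Int.mod num 256))).foldl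
              (fun (s : PySem.Set Int) r => PySem.Set.inter s
                (shiftCandidates r (PySem.Set.ofList (valid_chars.toList.map (fun c => (c.toNat : Int))))))
              (PySem.Set.ofList (PySem.List.pyRange 0 256 1)))
            (fun x => x) with
          | some m => some (o, m)
          | none => none) := by
    intro o
    rw [pv_group_eq _ _ hDom']
    cases PySem.List.min?
        ((PySem.Set.ofList (((PySem.List.slice? cipher_numbers (some o) none 3).getD []).map
            (fun num => PySem.Int.mod num 256))).foldl
          (fun (s : PySem.Set Int) r => PySem.Set.inter s
            (shiftCandidates r (PySem.Set.ofList (valid_chars.toList.map (fun c => (c.toNat : Int))))))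
          (PySem.Set.ofList (PySem.List.pyRange 0 256 1)))
        (fun x => x) <;> rfl
  exact List.filterMap_congr (fun o _ => hfun o)
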